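-- pv_equiv track=rewrite | github.com/Nghia03092004/nghia03092004.github.io | project_euler/problem_502/solution.py | solve_profile_dp_full
-- ===== SOURCE A (Python) =====
-- MOD = 10**9 + 7
--
-- def solve_profile_dp_full(w: int, h: int):
--     """Full profile DP tracking whether max height h has been reached.
--     State: (last_height, reached_top)
--     """
--     if w == 0:
--         return 0
--
--     # dp[j][t] = count of profiles of current length ending at height j,
--     # where t=1 means at least one column reached height h
--     dp = {}
--     for j in range(1, h + 1):
--         t = 1 if j == h else 0
--         dp[(j, t)] = 1
--
--     for col in range(2, w + 1):
--         new_dp = {}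
--         # Compute total for each 'reached_top' value
--         total = [0, 0]
--         for (j, t), cnt in dp.items():
--             total[t] = (total[t] + cnt) % MOD
--
--         for j2 in range(1, h + 1):
--             for t2 in range(2):
--                 # t_new: if t2=1 (already reached) or j2=h
--                 t_new = 1 if (t2 == 1 or j2 == h) else 0
--                 # Sum over all j != j2 with reached_top = t2
--                 # = total[t2] - dp.get((j2, t2), 0)
--                 contrib = (total[t2] - dp.get((j2, t2), 0)) % MOD
--                 key = (j2, t_new)
--                 new_dp[key] = (new_dp.get(key, 0) + contrib) % MOD
--         dp = new_dp
--
--     # Sum all states with reached_top = 1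
--     result = 0
--     for (j, t), cnt in dp.items():
--         if t == 1:
--             result = (result + cnt) % MOD
--     return result
-- ===== SOURCE B (Python) =====
-- MOD = 10**9 + 7
--
-- def solve_profile_dp_full(w: int, h: int):
--     """By symmetry over heights below h the full profile DP collapses to three
--     scalars: a = count per height j<h not yet reached top, b = count per
--     height j<h having reached top, c = count at height h.  O(w) instead of O(w*h)."""
--     if w == 0 or h <= 0:
--         return 0
--     a, b, c = 1, 0, 1
--     for _ in range(w - 1):
--         a, b, c = (h - 2) * a % MOD, ((h - 2) * b + c) % MOD, (h - 1) * (a + b) % MOD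
--     return ((h - 1) * b + c) % MOD
-- ===== Notes on version B (the rewrite author's own statement) =====
-- stated objective: faster
-- what changed: A's per-column dictionary DP over all 2h (height, reached-top) states is collapsed, using the symmetry over heights below h, to a 3-variable linear recurrence updated in O(1) per column, eliminating the inner scan over heights.
import Mathlib
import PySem

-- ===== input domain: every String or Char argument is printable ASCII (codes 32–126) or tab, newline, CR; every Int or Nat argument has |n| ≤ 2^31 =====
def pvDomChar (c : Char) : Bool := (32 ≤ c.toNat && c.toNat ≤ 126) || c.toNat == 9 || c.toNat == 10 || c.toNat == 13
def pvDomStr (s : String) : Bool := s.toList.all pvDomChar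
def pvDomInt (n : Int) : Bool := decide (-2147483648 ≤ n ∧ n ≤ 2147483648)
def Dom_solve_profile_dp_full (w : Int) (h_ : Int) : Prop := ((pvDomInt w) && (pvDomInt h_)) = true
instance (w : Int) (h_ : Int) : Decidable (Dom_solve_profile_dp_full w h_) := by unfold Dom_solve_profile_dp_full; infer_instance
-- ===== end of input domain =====

-- B collapses A's profile dictionary (which is symmetric over the heights below h) to three
-- scalars updated by a linear recurrence, removing the inner scan over heights.

def pvMOD : Int := 1000000007

-- ===== PORT A =====
def solve_profile_dp_full (w : Int) (h_ : Int) : Int :=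
  if w = 0 then 0 else
  let dp0 : PySem.Dict (Int × Int) Int :=
    (PySem.List.pyRange 1 (h_ + 1) 1).foldl
      (fun dp j => dp.insert (j, if j = h_ then (1 : Int) else 0) 1) PySem.Dict.empty
  let dp :=
    (PySem.List.pyRange 2 (w + 1) 1).foldl
      (fun dp _col =>
        -- total = [0, 0]: the second key component is always 0 or 1 by construction, so the
        -- two-element Python list indexed by t is ported exactly as a pair selected by `t = 1`
        let total : Int × Int :=
          dp.items.foldl
            (fun tot p =>
              if p.1.2 = 1 then (tot.1, PySem.Int.mod (tot.2 + p.2) pvMOD)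
              else (PySem.Int.mod (tot.1 + p.2) pvMOD, tot.2)) (0, 0)
        (PySem.List.pyRange 1 (h_ + 1) 1).foldl
          (fun nd j2 =>
            (PySem.List.pyRange 0 2 1).foldl
              (fun nd t2 =>
                let tNew : Int := if t2 = 1 ∨ j2 = h_ then 1 else 0
                let contrib : Int :=
                  PySem.Int.mod ((if t2 = 1 then total.2 else total.1) - dp.getD (j2, t2) 0) pvMOD
                nd.insert (j2, tNew) (PySem.Int.mod (nd.getD (j2, tNew) 0 + contrib) pvMOD))
              nd)
          PySem.Dict.empty)
      dp0
  dp.items.foldl (fun r p => if p.1.2 = 1 then PySem.Int.mod (r + p.2) pvMOD else r) 0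

-- ===== PORT B =====
def solve_profile_dp_full_alt (w : Int) (h_ : Int) : Int :=
  if w = 0 ∨ h_ ≤ 0 then 0 else
  let s :=
    (PySem.List.pyRange 0 (w - 1) 1).foldl
      (fun (s : Int × Int × Int) _ =>
        (PySem.Int.mod ((h_ - 2) * s.1) pvMOD,
         PySem.Int.mod ((h_ - 2) * s.2.1 + s.2.2) pvMOD,
         PySem.Int.mod ((h_ - 1) * (s.1 + s.2.1)) pvMOD))
      (1, 0, 1)
  PySem.Int.mod ((h_ - 1) * s.2.1 + s.2.2) pvMOD

-- ===== PRECONDITION & SPEC =====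
def Spec_solve_profile_dp_full (w : Int) (h_ : Int) (out : Int) : Prop := out = solve_profile_dp_full_alt w h_
instance (w : Int) (h_ : Int) (out : Int) : Decidable (Spec_solve_profile_dp_full w h_ out) := by unfold Spec_solve_profile_dp_full; infer_instance

-- ===== CLAIM (what is proved, stated in full; the proofs are below) =====
def Claim_equal_solve_profile_dp_full : Prop := ∀ (w : Int) (h_ : Int), Dom_solve_profile_dp_full w h_ → Spec_solve_profile_dp_full w h_ (solve_profile_dp_full w h_)

-- ===== LEMMAS AND PROOFS =====

-- abbreviations for A's loop pieces (definitionally equal to the lambdas in the port)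
def pvTotF (tot : Int × Int) (p : (Int × Int) × Int) : Int × Int :=
  if p.1.2 = 1 then (tot.1, PySem.Int.mod (tot.2 + p.2) pvMOD)
  else (PySem.Int.mod (tot.1 + p.2) pvMOD, tot.2)

def pvF0 (r : Int) (p : (Int × Int) × Int) : Int :=
  if p.1.2 = 1 then r else PySem.Int.mod (r + p.2) pvMOD

def pvResF (r : Int) (p : (Int × Int) × Int) : Int :=
  if p.1.2 = 1 then PySem.Int.mod (r + p.2) pvMOD else r

def pvInit (h_ : Int) : PySem.Dict (Int × Int) Int :=
  (PySem.List.pyRange 1 (h_ + 1) 1).foldl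
    (fun dp j => dp.insert (j, if j = h_ then (1 : Int) else 0) 1) PySem.Dict.empty

def pvColStep (h_ : Int) (dp : PySem.Dict (Int × Int) Int) : PySem.Dict (Int × Int) Int :=
  let total : Int × Int := dp.items.foldl pvTotF (0, 0)
  (PySem.List.pyRange 1 (h_ + 1) 1).foldl
    (fun nd j2 =>
      (PySem.List.pyRange 0 2 1).foldl
        (fun nd t2 =>
          let tNew : Int := if t2 = 1 ∨ j2 = h_ then 1 else 0
          let contrib : Int :=
            PySem.Int.mod ((if t2 = 1 then total.2 else total.1) - dp.getD (j2, t2) 0) pvMOD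
          nd.insert (j2, tNew) (PySem.Int.mod (nd.getD (j2, tNew) 0 + contrib) pvMOD))
        nd)
    PySem.Dict.empty

def pvBStep (h_ : Int) (s : Int × Int × Int) : Int × Int × Int :=
  (PySem.Int.mod ((h_ - 2) * s.1) pvMOD,
   PySem.Int.mod ((h_ - 2) * s.2.1 + s.2.2) pvMOD,
   PySem.Int.mod ((h_ - 1) * (s.1 + s.2.1)) pvMOD)

def pvFab (a b : Int) (j : Int) : List ((Int × Int) × Int) := [((j, (0:Int)), a), ((j, (1:Int)), b)]

def pvDfull (h_ a b c : Int) : PySem.Dict (Int × Int) Int :=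
  ⟨(PySem.List.pyRange 1 h_ 1).flatMap (pvFab a b) ++ [((h_, (1:Int)), c)]⟩

lemma pvA_eq (w h_ : Int) : solve_profile_dp_full w h_ =
    if w = 0 then 0 else
    (((PySem.List.pyRange 2 (w + 1) 1).foldl (fun d _ => pvColStep h_ d) (pvInit h_)).items.foldl
      pvResF 0) := rfl

lemma pvmod_eq (x : Int) : PySem.Int.mod x pvMOD = x % pvMOD :=
  PySem.Int.mod_eq_emod_of_pos (by norm_num [pvMOD])

lemma pv_mm (x : Int) : x % pvMOD % pvMOD = x % pvMOD := Int.emod_emod_of_dvd x dvd_rfl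

lemma pv_add_mod_left (x y : Int) : (x % pvMOD + y) % pvMOD = (x + y) % pvMOD := by
  conv_rhs => rw [Int.add_emod]
  rw [Int.add_emod (x % pvMOD), pv_mm]

lemma pv_add_mod_right (x y : Int) : (x + y % pvMOD) % pvMOD = (x + y) % pvMOD := by
  conv_rhs => rw [Int.add_emod]
  rw [Int.add_emod x (y % pvMOD), pv_mm]

lemma pv_sub_mod_left (x y : Int) : (x % pvMOD - y) % pvMOD = (x - y) % pvMOD := by
  conv_rhs => rw [Int.sub_emod]
  rw [Int.sub_emod (x % pvMOD), pv_mm]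

lemma pv_foldl_const {α β : Type} (f : β → β) (l : List α) (init : β) :
    l.foldl (fun s _ => f s) init = f^[l.length] init := by
  induction l generalizing init with
  | nil => rfl
  | cons x t ih => simp [List.foldl_cons, ih, Function.iterate_succ_apply]

-- folds of A's totals / result loops over the canonical item lists
lemma pv_resF_flat (a b : Int) (l : List Int) (r : Int) (hr : r % pvMOD = r) :
    (l.flatMap (pvFab a b)).foldl pvResF r = (r + l.length * b) % pvMOD := by
  induction l generalizing r with
  | nil => simpa using hr.symm
  | cons j t ih =>
      have h1 : pvResF r ((j, (0:Int)), a) = r := by simp [pvResF]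
      have h2 : pvResF r ((j, (1:Int)), b) = (r + b) % pvMOD := by
        simp [pvResF, pvmod_eq]
      simp only [List.flatMap_cons, pvFab, List.foldl_append, List.foldl_cons, List.foldl_nil, h1, h2]
      rw [ih _ (pv_mm _), pv_add_mod_left]
      congr 1
      push_cast [List.length_cons]
      ring

lemma pv_f0_flat (a b : Int) (l : List Int) (r : Int) (hr : r % pvMOD = r) :
    (l.flatMap (pvFab a b)).foldl pvF0 r = (r + l.length * a) % pvMOD := by
  induction l generalizing r with
  | nil => simpa using hr.symm
  | cons j t ih =>
      have h1 : pvF0 r ((j, (0:Int)), a) = (r + a) % pvMOD := by simp [pvF0, pvmod_eq]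
      have h2 : ∀ x : Int, pvF0 x ((j, (1:Int)), b) = x := by intro x; simp [pvF0]
      simp only [List.flatMap_cons, pvFab, List.foldl_append, List.foldl_cons, List.foldl_nil, h1, h2]
      rw [ih _ (pv_mm _), pv_add_mod_left]
      congr 1
      push_cast [List.length_cons]
      ring

lemma pv_totF_pair : pvTotF = fun tot p => (pvF0 tot.1 p, pvResF tot.2 p) := by
  funext tot p
  simp only [pvTotF, pvF0, pvResF]
  split <;> rfl

lemma pv_resF_map1 (l : List Int) (r : Int) :
    (l.map (fun j => ((j, (0:Int)), (1:Int)))).foldl pvResF r = r := by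
  induction l generalizing r with
  | nil => rfl
  | cons j t ih => simp [List.foldl_cons, pvResF, ih]

lemma pv_f0_map1 (l : List Int) (r : Int) (hr : r % pvMOD = r) :
    (l.map (fun j => ((j, (0:Int)), (1:Int)))).foldl pvF0 r = (r + l.length) % pvMOD := by
  induction l generalizing r with
  | nil => simpa using hr.symm
  | cons j t ih =>
      have h1 : pvF0 r ((j, (0:Int)), (1:Int)) = (r + 1) % pvMOD := by simp [pvF0, pvmod_eq]
      simp only [List.map_cons, List.foldl_cons, h1]
      rw [ih _ (pv_mm _), pv_add_mod_left]
      congr 1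
      push_cast [List.length_cons]
      ring

-- first-match lookup on the canonical item lists
lemma pv_get?_flat_mem0 (a b : Int) (l : List Int) (rest : List ((Int × Int) × Int)) (j : Int)
    (hj : j ∈ l) :
    (PySem.Dict.mk (l.flatMap (pvFab a b) ++ rest)).get? (j, 0) = some a := by
  induction l with
  | nil => cases hj
  | cons x t ih =>
      simp only [List.flatMap_cons, pvFab, List.cons_append, List.nil_append,
        PySem.Dict.get?_mk_cons]
      by_cases hx : x = j
      · simp [hx]
      · rcases List.mem_cons.mp hj with h | h
        · exact absurd h.symm hx
        · rw [if_neg (by simp [hx]), if_neg (by simp)]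
          simpa [pvFab, List.append_assoc] using ih h

lemma pv_get?_flat_mem1 (a b : Int) (l : List Int) (rest : List ((Int × Int) × Int)) (j : Int)
    (hj : j ∈ l) :
    (PySem.Dict.mk (l.flatMap (pvFab a b) ++ rest)).get? (j, 1) = some b := by
  induction l with
  | nil => cases hj
  | cons x t ih =>
      simp only [List.flatMap_cons, pvFab, List.cons_append, List.nil_append,
        PySem.Dict.get?_mk_cons]
      by_cases hx : x = j
      · simp [hx]
      · rcases List.mem_cons.mp hj with h | h
        · exact absurd h.symm hx
        · rw [if_neg (by simp [hx]), if_neg (by simp [hx])]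
          simpa [pvFab, List.append_assoc] using ih h

lemma pv_get?_flat_notmem (a b : Int) (l : List Int) (rest : List ((Int × Int) × Int)) (j t : Int)
    (hj : ¬ j ∈ l) :
    (PySem.Dict.mk (l.flatMap (pvFab a b) ++ rest)).get? (j, t) =
      (PySem.Dict.mk rest).get? (j, t) := by
  induction l with
  | nil => rfl
  | cons x s ih =>
      have hx : x ≠ j := fun h => hj (h ▸ List.mem_cons_self ..)
      have hs : ¬ j ∈ s := fun h => hj (List.mem_cons_of_mem _ h)
      simp only [List.flatMap_cons, pvFab, List.cons_append, List.nil_append,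
        PySem.Dict.get?_mk_cons]
      rw [if_neg (by simp [hx]), if_neg (by simp [hx])]
      simpa [pvFab, List.append_assoc] using ih hs

lemma pv_get?_map1_mem (l : List Int) (rest : List ((Int × Int) × Int)) (j : Int) (hj : j ∈ l) :
    (PySem.Dict.mk (l.map (fun j => ((j, (0:Int)), (1:Int))) ++ rest)).get? (j, 0) = some 1 := by
  induction l with
  | nil => cases hj
  | cons x t ih =>
      simp only [List.map_cons, List.cons_append, PySem.Dict.get?_mk_cons]
      by_cases hx : x = j
      · simp [hx]
      · rcases List.mem_cons.mp hj with h | h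
        · exact absurd h.symm hx
        · rw [if_neg (by simp [hx])]
          exact ih h

lemma pv_get?_map1_notmem (l : List Int) (rest : List ((Int × Int) × Int)) (j t : Int)
    (hj : ¬ j ∈ l ∨ t ≠ 0) :
    (PySem.Dict.mk (l.map (fun j => ((j, (0:Int)), (1:Int))) ++ rest)).get? (j, t) =
      (PySem.Dict.mk rest).get? (j, t) := by
  induction l with
  | nil => rfl
  | cons x s ih =>
      simp only [List.map_cons, List.cons_append, PySem.Dict.get?_mk_cons]
      rcases hj with hj | ht
      · have hx : x ≠ j := fun h => hj (h ▸ List.mem_cons_self ..)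
        rw [if_neg (by simp [hx])]
        exact ih (Or.inl fun h => hj (List.mem_cons_of_mem _ h))
      · rw [if_neg (by simp only [beq_iff_eq, Prod.mk.injEq]; rintro ⟨-, h0⟩; exact ht h0.symm)]
        exact ih (Or.inr ht)

-- the loop invariant: dp behaves (for every lookup and fold A performs) like the symmetric
-- profile state (a, b, c)
def pvRep (h_ : Int) (s : Int × Int × Int) (dp : PySem.Dict (Int × Int) Int) : Prop :=
  (∀ j : Int, 1 ≤ j → j < h_ → dp.getD (j, 0) 0 = s.1 ∧ dp.getD (j, 1) 0 = s.2.1) ∧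
  dp.getD (h_, 0) 0 = 0 ∧ dp.getD (h_, 1) 0 = s.2.2 ∧
  dp.items.foldl pvTotF (0, 0) =
    (((h_ - 1) * s.1) % pvMOD, ((h_ - 1) * s.2.1 + s.2.2) % pvMOD) ∧
  dp.items.foldl pvResF 0 = ((h_ - 1) * s.2.1 + s.2.2) % pvMOD

lemma pv_len_range (h_ : Int) (hh : 1 ≤ h_) :
    (((PySem.List.pyRange 1 h_ 1).length : Int)) = h_ - 1 := by
  rw [PySem.List.length_pyRange_one]
  omega

lemma pv_rep_full (h_ a b c : Int) (hh : 1 ≤ h_) : pvRep h_ (a, b, c) (pvDfull h_ a b c) := by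
  have hnotmem : ¬ (h_ : Int) ∈ PySem.List.pyRange 1 h_ 1 := by
    intro hmem
    have := (PySem.List.mem_pyRange_one).mp hmem
    omega
  refine ⟨?_, ?_, ?_, ?_, ?_⟩
  · intro j h1 h2
    have hmem : j ∈ PySem.List.pyRange 1 h_ 1 := PySem.List.mem_pyRange_one.mpr ⟨h1, h2⟩
    constructor
    · rw [PySem.Dict.getD_eq_get?_getD, pvDfull, pv_get?_flat_mem0 a b _ _ j hmem]; rfl
    · rw [PySem.Dict.getD_eq_get?_getD, pvDfull, pv_get?_flat_mem1 a b _ _ j hmem]; rfl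
  · rw [PySem.Dict.getD_eq_get?_getD, pvDfull, pv_get?_flat_notmem a b _ _ h_ 0 hnotmem,
      PySem.Dict.get?_mk_cons]
    rw [if_neg (by simp)]
    rfl
  · rw [PySem.Dict.getD_eq_get?_getD, pvDfull, pv_get?_flat_notmem a b _ _ h_ 1 hnotmem,
      PySem.Dict.get?_mk_cons]
    rw [if_pos (by simp)]
    rfl
  · show ((PySem.List.pyRange 1 h_ 1).flatMap (pvFab a b) ++ [((h_, (1:Int)), c)]).foldl
      pvTotF (0, 0) = _
    rw [pv_totF_pair, PySem.List.foldl_prod_mk, List.foldl_append, List.foldl_append,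
      pv_f0_flat a b _ 0 (by norm_num), pv_resF_flat a b _ 0 (by norm_num)]
    simp only [List.foldl_cons, List.foldl_nil, pvF0, pvResF]
    norm_num [pvmod_eq, pv_add_mod_left, pv_len_range h_ hh]
    have hcast : ((h_.toNat - 1 : Nat) : Int) = h_ - 1 := by omega
    rw [hcast]
    exact ⟨rfl, rfl⟩
  · show ((PySem.List.pyRange 1 h_ 1).flatMap (pvFab a b) ++ [((h_, (1:Int)), c)]).foldl
      pvResF 0 = _
    rw [List.foldl_append, pv_resF_flat a b _ 0 (by norm_num)]
    simp only [List.foldl_cons, List.foldl_nil, pvResF]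
    norm_num [pvmod_eq, pv_add_mod_left, pv_len_range h_ hh]
    have hcast : ((h_.toNat - 1 : Nat) : Int) = h_ - 1 := by omega
    rw [hcast]

-- the initial dictionary (after the first column) as an explicit item list
lemma pv_init_items (h_ : Int) (hh : 1 ≤ h_) :
    pvInit h_ = PySem.Dict.mk
      ((PySem.List.pyRange 1 h_ 1).map (fun j => ((j, (0:Int)), (1:Int))) ++ [((h_, 1), 1)]) := by
  apply PySem.Dict.ext
  rw [pvInit, PySem.Dict.items_foldl_insert_fresh (PySem.List.pyRange 1 (h_ + 1) 1)
      (fun j => ((j : Int), if j = h_ then (1:Int) else 0)) (fun _ => (1:Int)) PySem.Dict.empty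
      (fun a _ => PySem.Dict.contains_empty _)
      (List.Nodup.map (fun x y hxy => congrArg Prod.fst hxy) (PySem.List.nodup_pyRange_one _ _))]
  have hsplit : PySem.List.pyRange 1 (h_ + 1) 1 = PySem.List.pyRange 1 h_ 1 ++ [h_] :=
    PySem.List.pyRange_one_succ_right hh
  rw [hsplit, List.map_append]
  have hco : ∀ j ∈ PySem.List.pyRange 1 h_ 1,
      (fun j => (((j : Int), if j = h_ then (1:Int) else 0), (1:Int))) j =
      (fun j => ((j, (0:Int)), (1:Int))) j := by
    intro j hj
    have := PySem.List.mem_pyRange_one.mp hj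
    simp only
    rw [if_neg (by omega)]
  rw [List.map_congr_left hco]
  simp
  rfl

lemma pv_rep_init (h_ : Int) (hh : 1 ≤ h_) : pvRep h_ (1, 0, 1) (pvInit h_) := by
  rw [pv_init_items h_ hh]
  have hnotmem : ¬ (h_ : Int) ∈ PySem.List.pyRange 1 h_ 1 := by
    intro hmem
    have := (PySem.List.mem_pyRange_one).mp hmem
    omega
  have h1m : (1 : Int) % pvMOD = 1 := by decide
  refine ⟨?_, ?_, ?_, ?_, ?_⟩
  · intro j hj1 hj2
    have hmem : j ∈ PySem.List.pyRange 1 h_ 1 := PySem.List.mem_pyRange_one.mpr ⟨hj1, hj2⟩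
    constructor
    · rw [PySem.Dict.getD_eq_get?_getD, pv_get?_map1_mem _ _ j hmem]; rfl
    · rw [PySem.Dict.getD_eq_get?_getD, pv_get?_map1_notmem _ _ j 1 (Or.inr (by norm_num)),
        PySem.Dict.get?_mk_cons]
      rw [if_neg (by simp only [beq_iff_eq, Prod.mk.injEq]; rintro ⟨h0, -⟩; omega)]
      rfl
  · rw [PySem.Dict.getD_eq_get?_getD, pv_get?_map1_notmem _ _ h_ 0 (Or.inl hnotmem),
      PySem.Dict.get?_mk_cons]
    rw [if_neg (by simp)]
    rfl
  · rw [PySem.Dict.getD_eq_get?_getD, pv_get?_map1_notmem _ _ h_ 1 (Or.inl hnotmem),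
      PySem.Dict.get?_mk_cons]
    rw [if_pos (by simp)]
    rfl
  · show ((PySem.List.pyRange 1 h_ 1).map (fun j => ((j, (0:Int)), (1:Int)))
        ++ [((h_, (1:Int)), (1:Int))]).foldl pvTotF (0, 0) = _
    rw [pv_totF_pair, PySem.List.foldl_prod_mk, List.foldl_append, List.foldl_append,
      pv_f0_map1 _ 0 (by norm_num), pv_resF_map1]
    simp only [List.foldl_cons, List.foldl_nil, pvF0, pvResF]
    norm_num [pvmod_eq, pv_len_range h_ hh, h1m]
    have hcast : ((h_.toNat - 1 : Nat) : Int) = h_ - 1 := by omega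
    rw [hcast]
  · show ((PySem.List.pyRange 1 h_ 1).map (fun j => ((j, (0:Int)), (1:Int)))
        ++ [((h_, (1:Int)), (1:Int))]).foldl pvResF 0 = _
    rw [List.foldl_append, pv_resF_map1]
    simp only [List.foldl_cons, List.foldl_nil, pvResF]
    norm_num [pvmod_eq, h1m]

-- A's inner (j2, t2) double loop, with the totals pair abstracted as T
def pvBody (h_ : Int) (dp : PySem.Dict (Int × Int) Int) (T : Int × Int)
    (nd : PySem.Dict (Int × Int) Int) (j2 : Int) : PySem.Dict (Int × Int) Int :=
  (PySem.List.pyRange 0 2 1).foldl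
    (fun nd t2 =>
      let tNew : Int := if t2 = 1 ∨ j2 = h_ then 1 else 0
      let contrib : Int :=
        PySem.Int.mod ((if t2 = 1 then T.2 else T.1) - dp.getD (j2, t2) 0) pvMOD
      nd.insert (j2, tNew) (PySem.Int.mod (nd.getD (j2, tNew) 0 + contrib) pvMOD))
    nd

lemma pv_colStep_eq (h_ : Int) (dp : PySem.Dict (Int × Int) Int) :
    pvColStep h_ dp = (PySem.List.pyRange 1 (h_ + 1) 1).foldl
      (pvBody h_ dp (dp.items.foldl pvTotF (0, 0))) PySem.Dict.empty := rfl

lemma pv_r02 : PySem.List.pyRange 0 2 1 = [0, 1] := by decide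

lemma pv_get?_nil (x : Int × Int) :
    (PySem.Dict.mk ([] : List ((Int × Int) × Int))).get? x = none := rfl

lemma pv_body_lt (h_ : Int) (dp : PySem.Dict (Int × Int) Int) (T : Int × Int)
    (nd : PySem.Dict (Int × Int) Int) (j2 a b : Int) (hne : j2 ≠ h_)
    (hg0 : dp.getD (j2, 0) 0 = a) (hg1 : dp.getD (j2, 1) 0 = b)
    (hc0 : nd.contains (j2, 0) = false) (hc1 : nd.contains (j2, 1) = false) :
    pvBody h_ dp T nd j2 =
      (nd.insert (j2, 0) ((T.1 - a) % pvMOD)).insert (j2, 1) ((T.2 - b) % pvMOD) := by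
  rw [pvBody, pv_r02]
  simp only [List.foldl_cons, List.foldl_nil]
  norm_num [hne, hg0, hg1, hc0, hc1, PySem.Dict.getD_of_not_contains,
    PySem.Dict.getD_insert_of_ne, pvmod_eq, pv_mm]

lemma pv_body_top (h_ : Int) (dp : PySem.Dict (Int × Int) Int) (T : Int × Int)
    (nd : PySem.Dict (Int × Int) Int) (c : Int)
    (hg0 : dp.getD (h_, 0) 0 = 0) (hg1 : dp.getD (h_, 1) 0 = c)
    (hc1 : nd.contains (h_, 1) = false) (hT : T.1 % pvMOD = T.1) :
    pvBody h_ dp T nd h_ = nd.insert (h_, 1) ((T.1 + (T.2 - c) % pvMOD) % pvMOD) := by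
  rw [pvBody, pv_r02]
  simp only [List.foldl_cons, List.foldl_nil]
  norm_num [hg0, hg1, hc1, PySem.Dict.getD_of_not_contains, PySem.Dict.getD_insert_self,
    PySem.Dict.insert_insert_self, pvmod_eq, pv_mm, hT]

lemma pv_prefix (h_ : Int) (dp : PySem.Dict (Int × Int) Int) (T : Int × Int) (a b : Int)
    (hget : ∀ j : Int, 1 ≤ j → j < h_ → dp.getD (j, 0) 0 = a ∧ dp.getD (j, 1) 0 = b) :
    ∀ (l : List Int), l.Nodup → (∀ j ∈ l, 1 ≤ j ∧ j < h_) →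
    ∀ (nd : PySem.Dict (Int × Int) Int), (∀ j ∈ l, ∀ t : Int, nd.contains (j, t) = false) →
    l.foldl (pvBody h_ dp T) nd =
      PySem.Dict.mk (nd.items ++ l.flatMap (pvFab ((T.1 - a) % pvMOD) ((T.2 - b) % pvMOD))) := by
  intro l
  induction l with
  | nil =>
      intro _ _ nd _
      simp only [List.foldl_nil, List.flatMap_nil, List.append_nil]
  | cons x s ih =>
      intro hnd hb nd hfresh
      have hxb := hb x (List.mem_cons_self ..)
      have hbody := pv_body_lt h_ dp T nd x a b (by omega)
        (hget x hxb.1 hxb.2).1 (hget x hxb.1 hxb.2).2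
        (hfresh x (List.mem_cons_self ..) 0) (hfresh x (List.mem_cons_self ..) 1)
      rw [List.foldl_cons, hbody,
        ih (List.nodup_cons.mp hnd).2 (fun j hj => hb j (List.mem_cons_of_mem _ hj)) _ ?_]
      · rw [PySem.Dict.items_insert_of_not_contains, PySem.Dict.items_insert_of_not_contains]
        · simp [pvFab, List.append_assoc]
        · exact hfresh x (List.mem_cons_self ..) 0
        · rw [PySem.Dict.contains_insert]
          simp only [hfresh x (List.mem_cons_self ..) 1, Bool.or_false]
          simp
      · intro j hj t
        have hjx : j ≠ x := fun h => (List.nodup_cons.mp hnd).1 (h ▸ hj)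
        rw [PySem.Dict.contains_insert, PySem.Dict.contains_insert]
        simp only [hfresh j (List.mem_cons_of_mem _ hj) t, Bool.or_false]
        simp [hjx]

lemma pv_colStep_rep (h_ a b c : Int) (hh : 1 ≤ h_) (dp : PySem.Dict (Int × Int) Int)
    (hrep : pvRep h_ (a, b, c) dp) :
    pvColStep h_ dp =
      pvDfull h_ (((h_ - 2) * a) % pvMOD) (((h_ - 2) * b + c) % pvMOD)
        (((h_ - 1) * (a + b)) % pvMOD) := by
  obtain ⟨hget, hg0, hg1, htot, -⟩ := hrep
  dsimp only at hget hg0 hg1 htot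
  rw [pv_colStep_eq, htot]
  rw [PySem.List.pyRange_one_succ_right hh, List.foldl_append]
  rw [pv_prefix h_ dp _ a b hget (PySem.List.pyRange 1 h_ 1)
    (PySem.List.nodup_pyRange_one _ _)
    (fun j hj => PySem.List.mem_pyRange_one.mp hj) PySem.Dict.empty
    (fun j _ t => PySem.Dict.contains_empty _)]
  have hnotmem : ¬ (h_ : Int) ∈ PySem.List.pyRange 1 h_ 1 := by
    intro hmem
    have := (PySem.List.mem_pyRange_one).mp hmem
    omega
  have hempty : (PySem.Dict.empty : PySem.Dict (Int × Int) Int).items = [] := rfl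
  have hcfold : ∀ v1 v2 : Int, (PySem.Dict.mk
      ((PySem.Dict.empty : PySem.Dict (Int × Int) Int).items ++
        (PySem.List.pyRange 1 h_ 1).flatMap (pvFab v1 v2))).contains (h_, 1) = false := by
    intro v1 v2
    rw [PySem.Dict.contains_eq_isSome_get?, hempty, List.nil_append]
    have : (PySem.List.pyRange 1 h_ 1).flatMap (pvFab v1 v2) =
        (PySem.List.pyRange 1 h_ 1).flatMap (pvFab v1 v2) ++ [] := by simp
    rw [this, pv_get?_flat_notmem _ _ _ _ _ _ hnotmem, pv_get?_nil]
    rfl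
  rw [List.foldl_cons, List.foldl_nil]
  rw [pv_body_top h_ dp _ _ c hg0 hg1 (hcfold _ _) (pv_mm _)]
  apply PySem.Dict.ext
  rw [PySem.Dict.items_insert_of_not_contains _ _ (hcfold _ _)]
  dsimp only
  rw [hempty, List.nil_append]
  have e1 : ((h_ - 1) * a % pvMOD - a) % pvMOD = (h_ - 2) * a % pvMOD := by
    rw [pv_sub_mod_left]
    congr 1
    ring
  have e2 : (((h_ - 1) * b + c) % pvMOD - b) % pvMOD = ((h_ - 2) * b + c) % pvMOD := by
    rw [pv_sub_mod_left]
    congr 1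
    ring
  have e3 : ((h_ - 1) * a % pvMOD + (((h_ - 1) * b + c) % pvMOD - c) % pvMOD) % pvMOD
      = (h_ - 1) * (a + b) % pvMOD := by
    rw [pv_sub_mod_left, pv_add_mod_right, pv_add_mod_left]
    congr 1
    ring
  rw [e1, e2, e3]
  rfl

lemma pv_loop (h_ : Int) (hh : 1 ≤ h_) (l : List Int) :
    ∀ (s : Int × Int × Int) (dp : PySem.Dict (Int × Int) Int), pvRep h_ s dp →
    pvRep h_ ((pvBStep h_)^[l.length] s) (l.foldl (fun d _ => pvColStep h_ d) dp) := by
  induction l with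
  | nil => intro s dp hrep; exact hrep
  | cons x t ih =>
      rintro ⟨a, b, c⟩ dp hrep
      have hB : pvBStep h_ (a, b, c) =
          (((h_ - 2) * a) % pvMOD, ((h_ - 2) * b + c) % pvMOD,
           ((h_ - 1) * (a + b)) % pvMOD) := by
        simp [pvBStep, pvmod_eq]
      have hstep : pvRep h_ (pvBStep h_ (a, b, c)) (pvColStep h_ dp) := by
        rw [pv_colStep_rep h_ a b c hh dp hrep, hB]
        exact pv_rep_full h_ _ _ _ hh
      have := ih (pvBStep h_ (a, b, c)) (pvColStep h_ dp) hstep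
      simpa [List.foldl_cons, List.length_cons, Function.iterate_succ_apply] using this

lemma pv_colStep_nonpos (h_ : Int) (hh : h_ ≤ 0) (dp : PySem.Dict (Int × Int) Int) :
    pvColStep h_ dp = PySem.Dict.empty := by
  rw [pv_colStep_eq, PySem.List.pyRange_one_eq_nil (by omega)]
  rfl

lemma pv_loop_empty (h_ : Int) (hh : h_ ≤ 0) (l : List Int) :
    l.foldl (fun d _ => pvColStep h_ d) PySem.Dict.empty = PySem.Dict.empty := by
  induction l with
  | nil => rfl
  | cons x t ih => rw [List.foldl_cons, pv_colStep_nonpos h_ hh]; exact ih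

lemma pvB_eq (w h_ : Int) (hw : ¬ (w = 0 ∨ h_ ≤ 0)) :
    solve_profile_dp_full_alt w h_ =
      ((h_ - 1) * ((pvBStep h_)^[(w - 1).toNat] ((1:Int), (0:Int), (1:Int))).2.1 +
        ((pvBStep h_)^[(w - 1).toNat] ((1:Int), (0:Int), (1:Int))).2.2) % pvMOD := by
  rw [solve_profile_dp_full_alt, if_neg hw]
  have hfun : (fun (s : Int × Int × Int) (_ : Int) =>
      ((PySem.Int.mod ((h_ - 2) * s.1) pvMOD,
        PySem.Int.mod ((h_ - 2) * s.2.1 + s.2.2) pvMOD,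
        PySem.Int.mod ((h_ - 1) * (s.1 + s.2.1)) pvMOD) : Int × Int × Int)) =
      (fun s _ => pvBStep h_ s) := rfl
  rw [hfun, pv_foldl_const, PySem.List.length_pyRange_one, pvmod_eq]
  norm_num

-- ===== VERDICT (by name: the statement is the Claim_ definition above) =====
theorem solve_profile_dp_full_spec : Claim_equal_solve_profile_dp_full := by
  intro w h_ _
  unfold Spec_solve_profile_dp_full
  by_cases hw : w = 0
  · rw [pvA_eq, if_pos hw, solve_profile_dp_full_alt, if_pos (Or.inl hw)]
  by_cases hh : h_ ≤ 0
  · rw [pvA_eq, if_neg hw, solve_profile_dp_full_alt, if_pos (Or.inr hh)]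
    have hinit : pvInit h_ = PySem.Dict.empty := by
      rw [pvInit, PySem.List.pyRange_one_eq_nil (by omega)]
      rfl
    rw [hinit, pv_loop_empty h_ hh]
    rfl
  · have hh1 : 1 ≤ h_ := by omega
    have hrep := pv_loop h_ hh1 (PySem.List.pyRange 2 (w + 1) 1) (1, 0, 1) (pvInit h_)
      (pv_rep_init h_ hh1)
    have hl : (PySem.List.pyRange 2 (w + 1) 1).length = (w - 1).toNat := by
      rw [PySem.List.length_pyRange_one]
      congr 1
      ring
    rw [hl] at hrep
    rw [pvA_eq, if_neg hw, hrep.2.2.2.2, pvB_eq w h_ (not_or.mpr ⟨hw, hh⟩)]
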